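-- pv_equiv track=rewrite | github.com/louischatriot/advent-of-code | 2024/day_21.py | get_paths_between_digits
-- ===== SOURCE A (Python) =====
-- import itertools
--
-- matrix = [['7', '8', '9'], ['4', '5', '6'], ['1', '2', '3'], [None, '0', 'A']]
--
-- def get_num_paths(xs, ys, xe, ye, path):
--     if (xs, ys) == (xe, ye):
--         yield path
--         return
--
--     dx = -1 if xe < xs else (1 if xe > xs else 0)
--     dy = -1 if ye < ys else (1 if ye > ys else 0)
--
--     if (xs + dx, ys) != (0, 3) and dx != 0:
--         for p in get_num_paths(xs + dx, ys, xe, ye, path + ('<' if dx < 0 else '>')):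
--             yield p
--
--     if (xs, ys + dy) != (0, 3) and dy != 0:
--         for p in get_num_paths(xs, ys + dy, xe, ye, path + ('^' if dy < 0 else 'v')):
--             yield p
--
-- def get_paths_between_digits(d_start, d_end):
--     for x, y in itertools.product(range(3), range(4)):
--         if matrix[y][x] == d_start:
--             xs, ys = x, y
--         if matrix[y][x] == d_end:
--             xe, ye = x, y
--
--     for path in get_num_paths(xs, ys, xe, ye, ''):
--         yield path + 'A'
-- ===== SOURCE B (Python) =====
-- import itertools
--
-- matrix = [['7', '8', '9'], ['4', '5', '6'], ['1', '2', '3'], [None, '0', 'A']]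
--
-- def get_paths_between_digits(d_start, d_end):
--     pos = {matrix[y][x]: (x, y) for y in range(4) for x in range(3)}
--     xs, ys = pos[d_start]
--     xe, ye = pos[d_end]
--     nh, nv = abs(xe - xs), abs(ye - ys)
--     hch = '<' if xe < xs else '>'
--     vch = '^' if ye < ys else 'v'
--     sx = 1 if xe > xs else -1
--     sy = 1 if ye > ys else -1
--     n = nh + nv
--     # choose which slots hold the horizontal moves; combinations' lexicographic
--     # order of index tuples reproduces the DFS's horizontal-first path order
--     for hpos in itertools.combinations(range(n), nh):
--         x, y, ok, s = xs, ys, True, []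
--         for i in range(n):
--             if i in hpos:
--                 x += sx
--                 s.append(hch)
--             else:
--                 y += sy
--                 s.append(vch)
--             if (x, y) == (0, 3):
--                 ok = False
--                 break
--         if ok:
--             yield ''.join(s) + 'A'
-- ===== Notes on version B (the rewrite author's own statement) =====
-- stated objective: alternative
-- what changed: Replaces the pruned DFS over the keypad grid with a dict lookup of the two positions plus direct enumeration of move interleavings via combinations of horizontal-move slots (lexicographic index order reproduces the DFS's horizontal-first order), simulating each walk to reject ones crossing the gap.
import Mathlib
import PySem

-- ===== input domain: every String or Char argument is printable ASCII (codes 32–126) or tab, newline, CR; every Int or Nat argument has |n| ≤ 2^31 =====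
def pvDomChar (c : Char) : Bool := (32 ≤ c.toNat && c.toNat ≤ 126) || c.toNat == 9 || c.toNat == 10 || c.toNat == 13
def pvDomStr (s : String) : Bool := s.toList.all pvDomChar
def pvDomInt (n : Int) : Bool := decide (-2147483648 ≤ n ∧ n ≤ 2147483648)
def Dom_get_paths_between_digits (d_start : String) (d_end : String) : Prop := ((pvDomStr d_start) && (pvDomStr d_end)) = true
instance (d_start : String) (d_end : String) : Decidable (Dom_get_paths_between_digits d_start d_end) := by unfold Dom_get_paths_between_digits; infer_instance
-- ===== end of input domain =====

-- B replaces A's pruned DFS over the grid with a dict-based position lookup plus direct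
-- enumeration of the move interleavings via combinations of the horizontal-move slots,
-- filtering arrangements that walk through the gap (objective: alternative decomposition).

-- ===== PORT A =====
-- the numeric keypad; None is the gap
def pvMatrix : List (List (Option String)) :=
  [[some "7", some "8", some "9"], [some "4", some "5", some "6"],
   [some "1", some "2", some "3"], [none, some "0", some "A"]]

-- literal port of the recursive generator get_num_paths; fuel only makes the
-- recursion structurally terminating (5 steps suffice on the 3×4 grid; 8 is ample)
def pvGetNumPaths (fuel : Nat) (xs ys xe ye : Int) (path : String) : List String :=
  match fuel with
  | 0 => []
  | fuel + 1 =>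
    if xs = xe ∧ ys = ye then [path]
    else
      let dx : Int := if xe < xs then -1 else if xe > xs then 1 else 0
      let dy : Int := if ye < ys then -1 else if ye > ys then 1 else 0
      (if ¬(xs + dx = 0 ∧ ys = 3) ∧ dx ≠ 0 then
         pvGetNumPaths fuel (xs + dx) ys xe ye (path ++ (if dx < 0 then "<" else ">"))
       else []) ++
      (if ¬(xs = 0 ∧ ys + dy = 3) ∧ dy ≠ 0 then
         pvGetNumPaths fuel xs (ys + dy) xe ye (path ++ (if dy < 0 then "^" else "v"))
       else [])

-- the coordinate-search loop over product(range(3), range(4)); state = (xs,ys,xe,ye),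
-- none = the Python variable is still unbound (Python raises NameError then: outside Pre_)
def pvFindA (d_start d_end : String) :
    Option (Int × Int) × Option (Int × Int) :=
  (PySem.List.pyRange 0 3 1).foldl (fun st x =>
    (PySem.List.pyRange 0 4 1).foldl (fun st y =>
      let cell := PySem.List.pyGetD (PySem.List.pyGetD pvMatrix y []) x none
      let st := if cell = some d_start then (some (x, y), st.2) else st
      if cell = some d_end then (st.1, some (x, y)) else st) st) (none, none)

def get_paths_between_digits (d_start : String) (d_end : String) : List String :=
  match pvFindA d_start d_end with
  | (some (xs, ys), some (xe, ye)) =>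
      (pvGetNumPaths 8 xs ys xe ye "").map (fun p => p ++ "A")
  | _ => []  -- Python raises NameError here; excluded by Pre_

-- ===== PORT B =====
-- B's own copy of the keypad (the ports share no definitions)
def pvMatrixB : List (List (Option String)) :=
  [[some "7", some "8", some "9"], [some "4", some "5", some "6"],
   [some "1", some "2", some "3"], [none, some "0", some "A"]]

-- itertools.combinations(range n, k) in its lexicographic order
def pvCombos : Nat → List Int → List (List Int)
  | 0, _ => [[]]
  | _ + 1, [] => []
  | k + 1, x :: xs => (pvCombos k xs).map (fun c => x :: c) ++ pvCombos (k + 1) xs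

-- the inner walk: for i in range(n), step and abort on the gap
def pvWalk (hpos : List Int) (sx sy : Int) (hch vch : String) :
    List Int → Int → Int → List String → Option String
  | [], _, _, s => some (PySem.Str.join "" s.reverse)
  | i :: is, x, y, s =>
    let (x, y, s) :=
      if hpos.contains i then (x + sx, y, hch :: s) else (x, y + sy, vch :: s)
    if x = 0 ∧ y = 3 then none else pvWalk hpos sx sy hch vch is x y s

def get_paths_between_digits_alt (d_start : String) (d_end : String) : List String :=
  let pos : PySem.Dict (Option String) (Int × Int) :=
    (PySem.List.pyRange 0 4 1).foldl (fun d y =>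
      (PySem.List.pyRange 0 3 1).foldl (fun d x =>
        d.insert (PySem.List.pyGetD (PySem.List.pyGetD pvMatrixB y []) x none) (x, y)) d) PySem.Dict.empty
  match pos.get? (some d_start) with
  | none => []  -- KeyError in Python; excluded by Pre_
  | some (xs, ys) =>
    match pos.get? (some d_end) with
    | none => []  -- KeyError in Python; excluded by Pre_
    | some (xe, ye) =>
    let nh := (xe - xs).natAbs
    let nv := (ye - ys).natAbs
    let hch := if xe < xs then "<" else ">"
    let vch := if ye < ys then "^" else "v"
    let sx : Int := if xe > xs then 1 else -1
    let sy : Int := if ye > ys then 1 else -1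
    let n := nh + nv
    (pvCombos nh (PySem.List.pyRange 0 (n : Int) 1)).foldl (fun acc hpos =>
      match pvWalk hpos sx sy hch vch (PySem.List.pyRange 0 (n : Int) 1) xs ys [] with
      | some s => acc ++ [s ++ "A"]
      | none => acc) []

-- ===== PRECONDITION & SPEC =====
def pvKeys : List String := ["0", "1", "2", "3", "4", "5", "6", "7", "8", "9", "A"]

-- Pre_ excludes inputs that are not keypad labels: there A raises NameError
-- (xs/xe never get bound) and B raises KeyError.
def Pre_get_paths_between_digits (d_start : String) (d_end : String) : Prop :=
  d_start ∈ pvKeys ∧ d_end ∈ pvKeys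
instance (d_start : String) (d_end : String) : Decidable (Pre_get_paths_between_digits d_start d_end) := by unfold Pre_get_paths_between_digits; infer_instance

def pvWitness_get_paths_between_digits : String × String := ("7", "A")

def Spec_get_paths_between_digits (d_start : String) (d_end : String) (out : List String) : Prop := out = get_paths_between_digits_alt d_start d_end
instance (d_start : String) (d_end : String) (out : List String) : Decidable (Spec_get_paths_between_digits d_start d_end out) := by unfold Spec_get_paths_between_digits; infer_instance

-- ===== CLAIM (what is proved, stated in full; the proofs are below) =====
def Claim_equal_get_paths_between_digits : Prop := ∀ (d_start : String) (d_end : String), Dom_get_paths_between_digits d_start d_end → Pre_get_paths_between_digits d_start d_end → Spec_get_paths_between_digits d_start d_end (get_paths_between_digits d_start d_end)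

-- ===== LEMMAS AND PROOFS =====
-- A = B on every pair of keypad labels, checked by evaluation over the finite key set
theorem pv_all_keys : ∀ s ∈ pvKeys, ∀ e ∈ pvKeys,
    get_paths_between_digits s e = get_paths_between_digits_alt s e := by decide

-- ===== VERDICT (by name: the statement is the Claim_ definition above) =====
theorem get_paths_between_digits_spec : Claim_equal_get_paths_between_digits := by
  intro s e _ hpre
  exact pv_all_keys s hpre.1 e hpre.2
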